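-- pv_equiv track=rewrite | github.com/MartinThoma/algorithms | codejam/2016/1-Qualification/B.py | solve
-- ===== SOURCE A (Python) =====
-- def remove_end_plus(s):
--     """Remove plusses at the end."""
--     r = s[::-1]
--     new_s = ""
--     seen_minus = False
--     for el in r:
--         if not seen_minus:
--             if el == "-":
--                 seen_minus = True
--                 new_s = el
--         else:
--             new_s += el
--     return new_s[::-1]
--
-- def solve(pancakes):
--     """
--     Get the minimal number of switchings.
--
--     Parameters
--     ----------
--     pancakes : string
--
--     Returns
--     -------
--     int
--
--     Examples
--     --------
--     >>> solve("-")
--     1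
--     >>> solve("-+")
--     1
--     >>> solve("+-")
--     2
--     >>> solve("+++")
--     0
--     """
--     if "-" not in pancakes:
--         return 0
--     else:
--         pancakes = remove_end_plus(pancakes)
--         last = pancakes[0]
--         switches = 1
--         for el in pancakes[1:]:
--             if el != last:
--                 switches += 1
--                 last = el
--         return switches
-- ===== SOURCE B (Python) =====
-- def solve(pancakes):
--     ans = 0
--     runs = 0
--     prev = None
--     for ch in pancakes:
--         if ch != prev:
--             runs += 1
--             prev = ch
--         if ch == '-':
--             ans = runs
--     return ans
-- ===== Notes on version B (the rewrite author's own statement) =====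
-- stated objective: simpler
-- what changed: One forward pass that counts run boundaries and snapshots the run counter each time a minus character is seen, replacing the membership guard, the reverse-and-strip helper and the separate run-counting loop; no intermediate string is built.
import Mathlib
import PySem

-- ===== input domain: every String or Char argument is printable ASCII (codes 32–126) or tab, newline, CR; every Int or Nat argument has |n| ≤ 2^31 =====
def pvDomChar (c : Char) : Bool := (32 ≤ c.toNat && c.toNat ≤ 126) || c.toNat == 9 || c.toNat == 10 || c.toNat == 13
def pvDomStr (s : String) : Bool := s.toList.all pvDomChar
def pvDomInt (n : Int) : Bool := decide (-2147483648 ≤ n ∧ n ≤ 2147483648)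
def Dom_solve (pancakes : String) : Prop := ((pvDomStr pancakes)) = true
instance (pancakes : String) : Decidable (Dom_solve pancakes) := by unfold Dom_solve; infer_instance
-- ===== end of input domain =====

-- B replaces A's guard + reverse-and-strip helper + run-counting loop by one forward pass
-- that counts run boundaries and snapshots the counter at each minus character; objective: simpler.

-- ===== PORT A =====
-- loop of remove_end_plus: state (new_s, seen_minus), iterating over the reversed string
def repLoop : List Char → List Char → Bool → List Char
  | [], acc, _ => acc
  | e :: r, acc, seen =>
    if seen = false then
      if e = '-' then repLoop r [e] true else repLoop r acc seen
    else repLoop r (acc ++ [e]) seen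

def removeEndPlus (l : List Char) : List Char := (repLoop l.reverse [] false).reverse

-- the 'for el in pancakes[1:]' loop: state (last, switches)
def switchLoop : List Char → Char → Int → Int
  | [], _, sw => sw
  | e :: rest, last, sw =>
    if e ≠ last then switchLoop rest e (sw + 1) else switchLoop rest last sw

def solve (pancakes : String) : Int :=
  if !(PySem.Str.isIn "-" pancakes) then 0
  else
    match removeEndPlus pancakes.toList with
    | [] => 0   -- unreachable ([] never happens when '-' is in pancakes; Python's p[0] never raises)
    | c :: rest => switchLoop (PySem.List.slice (c :: rest) (some 1) none) c 1

-- ===== PORT B =====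
-- loop body of Source B: state (prev, runs, ans); 'prev = None' is 'none'
def altStep (s : Option Char × Int × Int) (ch : Char) : Option Char × Int × Int :=
  let prev := s.1
  let runs := s.2.1
  let ans := s.2.2
  let rp := if some ch ≠ prev then (runs + 1, some ch) else (runs, prev)
  let ans := if ch = '-' then rp.1 else ans
  (rp.2, rp.1, ans)

def solve_alt (pancakes : String) : Int :=
  (pancakes.toList.foldl altStep (none, 0, 0)).2.2

-- ===== PRECONDITION & SPEC =====
def Spec_solve (pancakes : String) (out : Int) : Prop := out = solve_alt pancakes
instance (pancakes : String) (out : Int) : Decidable (Spec_solve pancakes out) := by unfold Spec_solve; infer_instance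

-- ===== CLAIM (what is proved, stated in full; the proofs are below) =====
def Claim_equal_solve : Prop := ∀ (pancakes : String), Dom_solve pancakes → Spec_solve pancakes (solve pancakes)

-- ===== LEMMAS AND PROOFS =====

-- number of adjacent unequal pairs
def pvTrans : List Char → Int
  | [] => 0
  | [_] => 0
  | a :: b :: t => (if b ≠ a then 1 else 0) + pvTrans (b :: t)

-- the prefix of l up to (and including) its last '-'
def pvStrip (l : List Char) : List Char := (l.reverse.dropWhile (fun e => e != '-')).reverse

-- what both programs compute
def pvAns (l : List Char) : Int := if '-' ∈ l then 1 + pvTrans (pvStrip l) else 0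

theorem switchLoop_eq (xs : List Char) : ∀ (last : Char) (sw : Int),
    switchLoop xs last sw = sw + pvTrans (last :: xs) := by
  induction xs with
  | nil => intro last sw; simp [switchLoop, pvTrans]
  | cons e rest ih =>
    intro last sw
    by_cases h : e = last
    · subst h
      simp [switchLoop, ih, pvTrans]
    · simp [switchLoop, h, ih, pvTrans]
      ring

theorem repLoop_true (r : List Char) : ∀ (acc : List Char),
    repLoop r acc true = acc ++ r := by
  induction r with
  | nil => intro acc; simp [repLoop]
  | cons e t ih => intro acc; simp [repLoop, ih]

theorem repLoop_false (r : List Char) : ∀ (acc : List Char),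
    repLoop r acc false
      = if '-' ∈ r then r.dropWhile (fun e => e != '-') else acc := by
  induction r with
  | nil => intro acc; simp [repLoop]
  | cons e t ih =>
    intro acc
    by_cases h : e = '-'
    · subst h
      simp [repLoop, repLoop_true]
    · have he : (e != '-') = true := by simp [h]
      have h' : ¬ ('-' = e) := fun hh => h hh.symm
      simp [repLoop, h, ih, he, h', List.mem_cons]

theorem singleton_infix_iff (a : Char) (l : List Char) : [a] <:+: l ↔ a ∈ l := by
  constructor
  · rintro ⟨s, t, rfl⟩; simp
  · intro h
    obtain ⟨s, t, rfl⟩ := List.append_of_mem h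
    exact ⟨s, t, by simp⟩

theorem dash_toList : ("-" : String).toList = ['-'] := rfl

theorem pvStrip_ne_nil (l : List Char) (h : '-' ∈ l) : pvStrip l ≠ [] := by
  unfold pvStrip
  simp only [ne_eq, List.reverse_eq_nil_iff, List.dropWhile_eq_nil_iff]
  intro hall
  exact absurd (hall '-' (by simp [h])) (by simp)

theorem removeEndPlus_eq (l : List Char) (h : '-' ∈ l) :
    removeEndPlus l = pvStrip l := by
  unfold removeEndPlus pvStrip
  rw [repLoop_false, if_pos (by simp [h])]

-- A computes pvAns
theorem solve_eq (p : String) : solve p = pvAns p.toList := by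
  by_cases hm : '-' ∈ p.toList
  · have hin : PySem.Str.isIn "-" p = true := by
      rw [PySem.Str.isIn_eq, dash_toList]
      exact (PySem.Chars.isIn_iff_infix _ _).mpr ((singleton_infix_iff _ _).mpr hm)
    obtain ⟨c, rest, hcr⟩ := List.exists_cons_of_ne_nil (pvStrip_ne_nil p.toList hm)
    unfold solve
    rw [hin]
    simp only [Bool.not_true, Bool.false_eq_true, if_false]
    rw [removeEndPlus_eq _ hm, hcr]
    show switchLoop (PySem.List.slice (c :: rest) (some 1) none) c 1 = pvAns p.toList
    rw [PySem.List.slice_from_one, switchLoop_eq]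
    unfold pvAns
    rw [if_pos hm, hcr]
    simp
  · have hin : PySem.Chars.isIn ['-'] p.toList = false :=
      (PySem.Chars.isIn_eq_false_iff _ _).mpr
        (fun hh => hm ((singleton_infix_iff _ _).mp hh))
    unfold solve pvAns
    rw [PySem.Str.isIn_eq, dash_toList, hin, if_neg hm]
    simp

theorem pvTrans_cons_cons (x y : Char) (t : List Char) :
    pvTrans (x :: y :: t) = (if y ≠ x then 1 else 0) + pvTrans (y :: t) := rfl

theorem pvTrans_mid (m : List Char) (a b : Char) :
    pvTrans (m ++ [a] ++ [b]) = pvTrans (m ++ [a]) + (if b ≠ a then 1 else 0) := by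
  induction m with
  | nil => simp [pvTrans]
  | cons x xs ih =>
    cases xs with
    | nil => simp [pvTrans]
    | cons y t =>
      simp only [List.cons_append, pvTrans_cons_cons] at ih ⊢
      rw [ih]
      ring

theorem pvAns_snoc (m : List Char) (b : Char) :
    pvAns (m ++ [b]) = if b = '-' then 1 + pvTrans (m ++ [b]) else pvAns m := by
  by_cases hb : b = '-'
  · subst hb
    unfold pvAns pvStrip
    rw [if_pos (by simp)]
    simp
  · have he : (b != '-') = true := by simp [hb]
    have hmem : ('-' ∈ m ++ [b]) ↔ ('-' ∈ m) := by
      constructor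
      · intro h
        rcases List.mem_append.mp h with h | h
        · exact h
        · exact absurd (List.mem_singleton.mp h).symm hb
      · intro h
        exact List.mem_append.mpr (Or.inl h)
    unfold pvAns pvStrip
    rw [if_neg hb, List.reverse_append]
    simp only [List.reverse_singleton, List.singleton_append, List.dropWhile_cons, he,
      if_true, hmem]

-- invariant of B's fold over a nonempty list
theorem alt_inv (m : List Char) : ∀ (b : Char),
    List.foldl altStep (none, 0, 0) (m ++ [b])
      = (some b, 1 + pvTrans (m ++ [b]), pvAns (m ++ [b])) := by
  induction m using List.reverseRecOn with
  | nil =>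
    intro b
    simp only [List.nil_append, List.foldl_cons, List.foldl_nil, altStep]
    by_cases hb : b = '-'
    · simp [hb, pvTrans, pvAns, pvStrip]
    · simp [hb, pvTrans, pvAns, show ¬('-' = b) from fun h => hb h.symm]
  | append_singleton m' a ih =>
    intro b
    rw [List.foldl_append, ih a]
    simp only [List.foldl_cons, List.foldl_nil, altStep]
    rw [pvTrans_mid, pvAns_snoc (m' ++ [a]) b, pvTrans_mid]
    by_cases hb : b = a
    · subst hb
      simp
    · have hne : some b ≠ some a := by simp [hb]
      simp only [hne, if_true, ne_eq, hb, not_false_iff]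
      by_cases hd : b = '-' <;> simp [hd] <;> ring

-- B computes pvAns
theorem solve_alt_eq (p : String) : solve_alt p = pvAns p.toList := by
  unfold solve_alt
  cases hl : p.toList using List.reverseRecOn with
  | nil => simp [pvAns]
  | append_singleton m b => rw [alt_inv m b]

-- ===== VERDICT =====
theorem solve_spec : Claim_equal_solve := by
  intro p _
  unfold Spec_solve
  rw [solve_eq, solve_alt_eq]
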